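-- pv_equiv track=rewrite | github.com/osvald-go2/gaia_ai_doc_backend | nodes/understand_doc_parallel.py | split_document_for_parallel_processing
-- ===== SOURCE A (Python) =====
-- from typing import List, Dict, Any, Tuple
--
-- def extract_grid_blocks(content: str) -> List[Tuple[str, int]]:
--     """
--     从文档内容中提取所有的grid块
--
--     Returns:
--         List of (grid_content, start_line_number)
--     """
--     grid_blocks = []
--     lines = content.split('\n')
--     in_grid = False
--     grid_start = 0
--     grid_content = []
--
--     for i, line in enumerate(lines):
--         if line.strip().startswith('```grid'):
--             if not in_grid:
--                 in_grid = True
--                 grid_start = i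
--                 grid_content = []
--             grid_content.append(line)
--         elif line.strip() == '```' and in_grid:
--             grid_content.append(line)
--             grid_blocks.append(('\n'.join(grid_content), grid_start))
--             in_grid = False
--         elif in_grid:
--             grid_content.append(line)
--
--     return grid_blocks
--
-- def split_document_for_parallel_processing(content: str, max_interfaces_per_chunk: int = 3) -> List[str]:
--     """
--     将文档分割成适合并行处理的块
--     每个块包含多个grid块，但不超过max_interfaces_per_chunk
--     """
--     grid_blocks = extract_grid_blocks(content)
--
--     if not grid_blocks:
--         return [content]  # 如果没有grid块，返回原始内容
--
--     chunks = []
--     current_chunk_blocks = []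
--     current_chunk_size = 0
--
--     for grid_content, grid_start in grid_blocks:
--         if current_chunk_size >= max_interfaces_per_chunk:
--             # 当前的块已满，开始新块
--             if current_chunk_blocks:
--                 chunk_content = '\n\n'.join(current_chunk_blocks)
--                 chunks.append(chunk_content)
--             current_chunk_blocks = [grid_content]
--             current_chunk_size = 1
--         else:
--             current_chunk_blocks.append(grid_content)
--             current_chunk_size += 1
--
--     # 添加最后一个块
--     if current_chunk_blocks:
--         chunk_content = '\n\n'.join(current_chunk_blocks)
--         chunks.append(chunk_content)
--
--     return chunks
-- ===== SOURCE B (Python) =====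
-- from typing import List, Tuple
--
-- def extract_grid_blocks(content: str) -> List[Tuple[str, int]]:
--     grid_blocks = []
--     lines = content.split('\n')
--     in_grid = False
--     grid_start = 0
--     grid_content = []
--     for i, line in enumerate(lines):
--         if line.strip().startswith('```grid'):
--             if not in_grid:
--                 in_grid = True
--                 grid_start = i
--                 grid_content = []
--             grid_content.append(line)
--         elif line.strip() == '```' and in_grid:
--             grid_content.append(line)
--             grid_blocks.append(('\n'.join(grid_content), grid_start))
--             in_grid = False
--         elif in_grid:
--             grid_content.append(line)
--     return grid_blocks
--
-- def split_document_for_parallel_processing(content: str, max_interfaces_per_chunk: int = 3) -> List[str]: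
--     grid_blocks = extract_grid_blocks(content)
--     if not grid_blocks:
--         return [content]
--     contents = [g for g, _ in grid_blocks]
--     size = max(max_interfaces_per_chunk, 1)  # A puts one block per chunk when max <= 0
--     chunks = []
--     rest = contents
--     while rest:
--         chunks.append('\n\n'.join(rest[:size]))
--         rest = rest[size:]
--     return chunks
-- ===== Notes on version B (the rewrite author's own statement) =====
-- stated objective: simpler
-- what changed: The running-counter accumulate/flush chunking loop is replaced by batching the list of grid contents with take/drop slices of an effective size max(max_interfaces_per_chunk,1); the grid-block parse is kept.
import Mathlib
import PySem

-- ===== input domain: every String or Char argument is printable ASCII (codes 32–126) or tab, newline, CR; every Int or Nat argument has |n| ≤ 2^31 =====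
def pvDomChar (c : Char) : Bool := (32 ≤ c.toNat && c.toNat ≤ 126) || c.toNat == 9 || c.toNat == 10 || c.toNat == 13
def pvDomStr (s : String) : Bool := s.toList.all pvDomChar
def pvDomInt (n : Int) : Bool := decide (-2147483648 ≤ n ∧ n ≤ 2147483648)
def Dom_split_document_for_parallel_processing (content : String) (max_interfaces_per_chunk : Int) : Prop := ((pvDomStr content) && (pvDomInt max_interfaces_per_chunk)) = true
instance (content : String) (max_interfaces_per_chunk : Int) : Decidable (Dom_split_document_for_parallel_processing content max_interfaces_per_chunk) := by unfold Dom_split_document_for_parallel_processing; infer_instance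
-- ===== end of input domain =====

-- B replaces A's running-counter accumulate/flush loop by take/drop batching of the grid
-- contents with effective size max(max_interfaces_per_chunk, 1); objective: simpler.

-- ===== PORT A =====
-- shared helper: literal port of extract_grid_blocks (both Source A and Source B contain this code verbatim)
-- state: (grid_blocks, in_grid, grid_start, grid_content)
def extract_grid_blocks (content : String) : List (String × Int) :=
  let lines := (PySem.Str.split? content "\n").getD []  -- split? is some for sep ≠ ""
  let st := (PySem.List.enumerate lines).foldl
    (fun (s : List (String × Int) × Bool × Int × List String) li =>
      let (blocks, in_grid, grid_start, grid_content) := s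
      let i : Int := li.1
      let line := li.2
      if PySem.Str.startswith (PySem.Str.strip line) "```grid" then
        if !in_grid then (blocks, true, i, [line])
        else (blocks, in_grid, grid_start, grid_content ++ [line])
      else if PySem.Str.strip line == "```" && in_grid then
        (blocks ++ [(PySem.Str.join "\n" (grid_content ++ [line]), grid_start)],
         false, grid_start, grid_content ++ [line])
      else if in_grid then (blocks, in_grid, grid_start, grid_content ++ [line])
      else s)
    ([], false, 0, [])
  st.1

def split_document_for_parallel_processing (content : String) (max_interfaces_per_chunk : Int) : List String :=
  let grid_blocks := extract_grid_blocks content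
  if grid_blocks.isEmpty then [content]
  else
    -- state: (chunks, current_chunk_blocks, current_chunk_size)
    let st := grid_blocks.foldl
      (fun (s : List String × List String × Int) gb =>
        let (chunks, cur, size) := s
        if max_interfaces_per_chunk ≤ size then
          ((if cur ≠ [] then chunks ++ [PySem.Str.join "\n\n" cur] else chunks), [gb.1], 1)
        else (chunks, cur ++ [gb.1], size + 1))
      ([], [], 0)
    if st.2.1 ≠ [] then st.1 ++ [PySem.Str.join "\n\n" st.2.1] else st.1

-- ===== PORT B =====
-- the while loop of Source B: rest nonempty → emit '\n\n'.join(rest[:k+1]), continue with rest[(k+1):]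
-- (k+1 is the effective batch size, so k+1 ≥ 1 and the argument shrinks structurally)
def pvBatches (k : Nat) : List String → List String
  | [] => []
  | c :: cs => PySem.Str.join "\n\n" (List.take (k + 1) (c :: cs)) :: pvBatches k (List.drop k cs)
termination_by cs => cs.length
decreasing_by simp [List.length_drop]

def split_document_for_parallel_processing_alt (content : String) (max_interfaces_per_chunk : Int) : List String :=
  let grid_blocks := extract_grid_blocks content
  if grid_blocks.isEmpty then [content]
  else
    let contents := grid_blocks.map (·.1)
    let size := (max max_interfaces_per_chunk 1).toNat   -- size = max(max_interfaces_per_chunk, 1) ≥ 1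
    pvBatches (size - 1) contents

-- ===== PRECONDITION & SPEC =====
def Spec_split_document_for_parallel_processing (content : String) (max_interfaces_per_chunk : Int) (out : List String) : Prop := out = split_document_for_parallel_processing_alt content max_interfaces_per_chunk
instance (content : String) (max_interfaces_per_chunk : Int) (out : List String) : Decidable (Spec_split_document_for_parallel_processing content max_interfaces_per_chunk out) := by unfold Spec_split_document_for_parallel_processing; infer_instance

-- ===== CLAIM (what is proved, stated in full; the proofs are below) =====
def Claim_equal_split_document_for_parallel_processing : Prop := ∀ (content : String) (max_interfaces_per_chunk : Int), Dom_split_document_for_parallel_processing content max_interfaces_per_chunk → Spec_split_document_for_parallel_processing content max_interfaces_per_chunk (split_document_for_parallel_processing content max_interfaces_per_chunk)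

-- ===== LEMMAS AND PROOFS =====

-- A's chunking loop, from a nonempty partial chunk cur of length j (1 ≤ j ≤ k+1, where
-- k+1 = max(m,1)), followed by the final flush, appends exactly the take/drop batches.
theorem pvLoopA (m : Int) (k : Nat) (hk : (k : Int) + 1 = max m 1) :
    ∀ (cs : List (String × Int)) (chunks cur : List String) (j : Nat),
      cur ≠ [] → (j : Int) = cur.length → j ≤ k + 1 →
      (let st := cs.foldl
        (fun (s : List String × List String × Int) gb =>
          let (chunks, cur, size) := s
          if m ≤ size then
            ((if cur ≠ [] then chunks ++ [PySem.Str.join "\n\n" cur] else chunks), [gb.1], 1)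
          else (chunks, cur ++ [gb.1], size + 1))
        (chunks, cur, (j : Int))
       if st.2.1 ≠ [] then st.1 ++ [PySem.Str.join "\n\n" st.2.1] else st.1)
      = chunks ++ [PySem.Str.join "\n\n" (cur ++ (cs.map (·.1)).take (k + 1 - j))]
          ++ pvBatches k ((cs.map (·.1)).drop (k + 1 - j)) := by
  intro cs
  induction cs with
  | nil =>
      intro chunks cur j hne _ _
      simp [List.foldl, pvBatches, hne]
  | cons c cs ih =>
      intro chunks cur j hne hj hjk
      have hj1 : 1 ≤ j := by
        have : cur.length ≠ 0 := by simpa using List.length_pos_of_ne_nil hne |>.ne'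
        omega
      by_cases hcond : m ≤ (j : Int)
      · -- flush: j must equal k+1
        have hjeq : j = k + 1 := by omega
        have := ih (chunks ++ [PySem.Str.join "\n\n" cur]) [c.1] 1 (by simp) (by simp) (by omega)
        simp only [List.foldl_cons, if_pos hcond, if_pos hne, Nat.cast_one] at *
        rw [this]
        subst hjeq
        simp [pvBatches]
      · -- append to current chunk
        have := ih chunks (cur ++ [c.1]) (j + 1)
          (by simp) (by simp [← hj]) (by omega)
        simp only [List.foldl_cons, if_neg hcond] at *
        have hcast : (j : Int) + 1 = ((j + 1 : Nat) : Int) := by push_cast; ring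
        rw [hcast, this]
        have htk : k + 1 - j = (k + 1 - (j + 1)) + 1 := by omega
        simp [htk, List.take_succ_cons, List.drop_succ_cons]

-- ===== VERDICT (by name: the statement is the Claim_ definition above) =====
theorem split_document_for_parallel_processing_spec : Claim_equal_split_document_for_parallel_processing := by
  intro content m _
  show _ = _
  unfold split_document_for_parallel_processing split_document_for_parallel_processing_alt
  cases hgb : extract_grid_blocks content with
  | nil => simp
  | cons b bs =>
      simp only [List.isEmpty_cons, if_neg Bool.false_ne_true]
      set k : Nat := (max m 1).toNat - 1 with hkdef
      have hk : (k : Int) + 1 = max m 1 := by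
        simp [hkdef]
      -- first iteration: both branches give ([], [b.1], 1)
      have hfirst :
          (fun (s : List String × List String × Int) gb =>
            let (chunks, cur, size) := s
            if m ≤ size then
              ((if cur ≠ [] then chunks ++ [PySem.Str.join "\n\n" cur] else chunks), [gb.1], 1)
            else (chunks, cur ++ [gb.1], size + 1)) ([], [], 0) b
          = (([] : List String), [b.1], (1 : Int)) := by
        by_cases h : m ≤ (0 : Int) <;> simp [h]
      have main := pvLoopA m k hk bs [] [b.1] 1 (by simp) (by simp) (by omega)
      simp only [List.foldl_cons, hfirst, Nat.cast_one] at *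
      rw [main]
      simp only [List.map_cons, pvBatches, List.take_succ_cons]
      simp
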